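-- pv_equiv track=rewrite | github.com/HodzaArmen/P1 | ZemljevidOvir/ZemljevidOvir.py | pretvori_vrstico
-- ===== SOURCE A (Python) =====
-- def pretvori_vrstico(vrstica):
--     ovire = []
--     trenutnaOvira = None
--     index = 1
--     for znak in vrstica:
--         if znak == "#":
--             if trenutnaOvira is None:
--                 trenutnaOvira = (index, index)
--             else:
--                 trenutnaOvira = (trenutnaOvira[0], index)
--         else:
--             if trenutnaOvira is not None:
--                 ovire.append(trenutnaOvira)
--                 trenutnaOvira = None
--         index += 1
--     if trenutnaOvira is not None:
--         ovire.append(trenutnaOvira)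
--     return ovire
-- ===== SOURCE B (Python) =====
-- import re
--
-- def pretvori_vrstico(vrstica):
--     return [(m.start() + 1, m.end()) for m in re.finditer(r"#+", vrstica)]
-- ===== Notes on version B (the rewrite author's own statement) =====
-- stated objective: idiomatic
-- what changed: Replaces the per-character state machine (open-interval tracking with an end-of-string flush) by regex run extraction: re.finditer(r'#+') yields each maximal '#' run directly as (start+1, end).
import Mathlib
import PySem

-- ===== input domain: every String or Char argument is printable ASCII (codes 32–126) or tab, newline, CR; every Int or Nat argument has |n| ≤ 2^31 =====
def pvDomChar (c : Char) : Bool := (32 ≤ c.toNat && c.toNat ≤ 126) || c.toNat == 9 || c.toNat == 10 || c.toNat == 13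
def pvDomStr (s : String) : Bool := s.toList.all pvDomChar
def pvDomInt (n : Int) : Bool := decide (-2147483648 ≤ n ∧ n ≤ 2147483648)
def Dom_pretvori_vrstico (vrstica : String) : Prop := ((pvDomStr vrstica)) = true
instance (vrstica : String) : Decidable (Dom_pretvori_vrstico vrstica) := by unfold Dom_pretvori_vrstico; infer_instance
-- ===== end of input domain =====

-- ===== PORT A =====
-- B replaces A's per-character open-interval state machine by regex-style maximal-run extraction.
-- Port of A: loop over the characters with state (ovire, trenutnaOvira, index).
def pretvoriLoopA : List Char → List (Int × Int) → Option (Int × Int) → Int → List (Int × Int)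
  | [], ovire, cur, _ =>
      match cur with
      | none => ovire
      | some t => ovire ++ [t]
  | znak :: rest, ovire, cur, index =>
      if znak = '#' then
        match cur with
        | none => pretvoriLoopA rest ovire (some (index, index)) (index + 1)
        | some t => pretvoriLoopA rest ovire (some (t.1, index)) (index + 1)
      else
        match cur with
        | none => pretvoriLoopA rest ovire none (index + 1)
        | some t => pretvoriLoopA rest (ovire ++ [t]) none (index + 1)

def pretvori_vrstico (vrstica : String) : List (Int × Int) :=
  pretvoriLoopA vrstica.toList [] none 1

-- ===== PORT B =====
-- Port of B: re.finditer(r"#+") scans left to right for maximal '#' runs; for the fixed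
-- pattern "#+" this is exactly: skip non-'#' chars, consume a maximal run, emit (start+1, end).
-- `runsB l i` scans from 1-based index i; `eatB l s i` is inside a run begun at index s,
-- the last '#' seen at index i-1 (exact for this pattern on any string).
mutual
  def runsB : List Char → Int → List (Int × Int)
    | [], _ => []
    | c :: rest, i =>
        if c = '#' then eatB rest i (i + 1) else runsB rest (i + 1)
  def eatB : List Char → Int → Int → List (Int × Int)
    | [], s, i => [(s, i - 1)]
    | c :: rest, s, i =>
        if c = '#' then eatB rest s (i + 1) else (s, i - 1) :: runsB rest (i + 1)
end

def pretvori_vrstico_alt (vrstica : String) : List (Int × Int) :=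
  runsB vrstica.toList 1

-- ===== PRECONDITION & SPEC =====
def Spec_pretvori_vrstico (vrstica : String) (out : List (Int × Int)) : Prop := out = pretvori_vrstico_alt vrstica
instance (vrstica : String) (out : List (Int × Int)) : Decidable (Spec_pretvori_vrstico vrstica out) := by unfold Spec_pretvori_vrstico; infer_instance

-- ===== CLAIM (what is proved, stated in full; the proofs are below) =====
def Claim_equal_pretvori_vrstico : Prop := ∀ (vrstica : String), Dom_pretvori_vrstico vrstica → Spec_pretvori_vrstico vrstica (pretvori_vrstico vrstica)

-- ===== LEMMAS AND PROOFS =====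
theorem loopA_eq : ∀ (l : List Char) (acc : List (Int × Int)) (i : Int),
    pretvoriLoopA l acc none i = acc ++ runsB l i ∧
    ∀ s, pretvoriLoopA l acc (some (s, i - 1)) i = acc ++ eatB l s i := by
  intro l
  induction l with
  | nil => intro acc i; simp [pretvoriLoopA, runsB, eatB]
  | cons c rest ih =>
    intro acc i
    constructor
    · by_cases hc : c = '#'
      · have h2 := (ih acc (i + 1)).2 i
        simp [pretvoriLoopA, runsB, hc] at h2 ⊢
        simpa using h2
      · have h1 := (ih acc (i + 1)).1
        simp [pretvoriLoopA, runsB, hc, h1]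
    · intro s
      by_cases hc : c = '#'
      · have h2 := (ih acc (i + 1)).2 s
        simp [pretvoriLoopA, eatB, hc] at h2 ⊢
        simpa using h2
      · have h1 := (ih (acc ++ [(s, i - 1)]) (i + 1)).1
        simp [pretvoriLoopA, eatB, hc, h1]

-- ===== VERDICT (by name: the statement is the Claim_ definition above) =====
theorem pretvori_vrstico_spec : Claim_equal_pretvori_vrstico := by
  intro v _
  unfold Spec_pretvori_vrstico pretvori_vrstico pretvori_vrstico_alt
  simpa using (loopA_eq v.toList [] 1).1
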